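-- pv_equiv track=rewrite | github.com/jaredledvina/adventofcode2022 | day1/day1.py | part1
-- ===== SOURCE A (Python) =====
-- def part1(puzzle_input):
--     """
--     >>> part1([1000,2000,3000,'',4000,'',5000,6000,'',7000,8000,9000,'',10000])
--     24000
--     """
--     elves_calories = {}
--     elf_id = 1
--     calories = 0
--     for entry in puzzle_input:
--         if entry != '':
--             calories += int(entry)
--         else:
--             elves_calories[elf_id] = calories
--             elf_id += 1
--             calories = 0
--     elves_calories[elf_id] = calories
--     return max(elves_calories.values())
-- ===== SOURCE B (Python) =====
-- def part1(puzzle_input):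
--     # Recursive divide at the first '' separator: sum the first group via a
--     # slice, recurse on the remainder, combine with max (vs A's single pass
--     # accumulating into a dict keyed by a running elf id).
--     if '' in puzzle_input:
--         i = puzzle_input.index('')
--         first = sum(int(e) for e in puzzle_input[:i])
--         return max(first, part1(puzzle_input[i + 1:]))
--     return sum(int(e) for e in puzzle_input)
-- ===== Notes on version B (the rewrite author's own statement) =====
-- stated objective: alternative
-- what changed: B is recursive: it splits at the first '' separator (index + slices), sums the first group, and combines with max over the recursion, instead of A's iterative single pass accumulating a running sum into a dict keyed by an elf id and taking max of the dict values.
import Mathlib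
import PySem

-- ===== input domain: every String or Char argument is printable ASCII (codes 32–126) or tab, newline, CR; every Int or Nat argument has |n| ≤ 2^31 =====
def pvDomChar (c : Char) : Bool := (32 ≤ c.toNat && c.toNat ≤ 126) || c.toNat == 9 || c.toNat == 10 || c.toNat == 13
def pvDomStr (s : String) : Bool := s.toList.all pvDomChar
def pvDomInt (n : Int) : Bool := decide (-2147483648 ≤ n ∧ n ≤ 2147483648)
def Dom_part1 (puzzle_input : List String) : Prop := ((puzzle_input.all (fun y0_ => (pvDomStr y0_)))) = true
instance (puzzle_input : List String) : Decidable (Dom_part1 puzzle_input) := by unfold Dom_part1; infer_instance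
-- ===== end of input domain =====

-- B replaces A's iterative dict-accumulating pass by recursion that splits at the
-- first '' separator and folds max through the recursion (alternative decomposition).

-- ===== PORT A =====
-- A's loop state: (elves_calories, elf_id, calories); int(entry) = PySem.Int.ofStr? (Pre_ guarantees it parses).
-- loop body of A, as a named helper (state = (elves_calories, elf_id, calories))
def part1Step (st : PySem.Dict Int Int × Int × Int) (entry : String) :
    PySem.Dict Int Int × Int × Int :=
  if entry ≠ "" then (st.1, st.2.1, st.2.2 + (PySem.Int.ofStr? entry).getD 0)
  else (st.1.insert st.2.1 st.2.2, st.2.1 + 1, 0)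

def part1 (puzzle_input : List String) : Int :=
  let st := puzzle_input.foldl part1Step (PySem.Dict.empty, 1, 0)
  let d := st.1.insert st.2.1 st.2.2
  (PySem.List.max? d.values (fun x => x)).getD 0

-- ===== PORT B =====
-- B: if '' in xs: i = xs.index(''); max(sum of xs[:i], part1(xs[i+1:])); else sum(xs).
def part1_alt (puzzle_input : List String) : Int :=
  if h : "" ∈ puzzle_input then
    let i : Nat := (PySem.List.index? puzzle_input "").getD 0
    let first := (PySem.List.slice puzzle_input none (some (i : Int))).foldl
      (fun a e => a + (PySem.Int.ofStr? e).getD 0) 0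
    max first (part1_alt (PySem.List.slice puzzle_input (some ((i : Int) + 1)) none))
  else
    puzzle_input.foldl (fun a e => a + (PySem.Int.ofStr? e).getD 0) 0
termination_by puzzle_input.length
decreasing_by
  have h1 : ((i : Int) + 1) = ((i + 1 : Nat) : Int) := by push_cast; ring
  rw [h1, PySem.List.slice_from_natCast]
  have : 0 < puzzle_input.length := List.length_pos_of_mem h
  simp [List.length_drop]; omega

-- ===== PRECONDITION & SPEC =====
-- Pre_ excludes exactly the inputs where int(entry) raises ValueError on a non-empty entry.
def Pre_part1 (puzzle_input : List String) : Prop :=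
  ∀ s ∈ puzzle_input, s ≠ "" → (PySem.Int.ofStr? s).isSome = true
instance (puzzle_input : List String) : Decidable (Pre_part1 puzzle_input) := by unfold Pre_part1; infer_instance
def pvWitness_part1 : List String := ["1000", "2000", "", "4000"]

def Spec_part1 (puzzle_input : List String) (out : Int) : Prop := out = part1_alt puzzle_input
instance (puzzle_input : List String) (out : Int) : Decidable (Spec_part1 puzzle_input out) := by unfold Spec_part1; infer_instance

-- ===== CLAIM (what is proved, stated in full; the proofs are below) =====
def Claim_equal_part1 : Prop := ∀ (puzzle_input : List String), Dom_part1 puzzle_input → Pre_part1 puzzle_input → Spec_part1 puzzle_input (part1 puzzle_input)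

-- ===== LEMMAS AND PROOFS =====

-- value of one entry
def pvV (e : String) : Int := (PySem.Int.ofStr? e).getD 0

-- reference: the list of group sums, split at '' with running accumulator c
def pvCS (c : Int) : List String → List Int
  | [] => [c]
  | x :: xs => if x = "" then c :: pvCS 0 xs else pvCS (c + pvV x) xs

def pvS (xs : List String) : Int := xs.foldl (fun a e => a + pvV e) 0

lemma pvS_shift (xs : List String) (c : Int) :
    xs.foldl (fun a e => a + pvV e) c = c + pvS xs := by
  induction xs generalizing c with
  | nil => simp [pvS]
  | cons x xs ih => simp only [pvS, List.foldl_cons]; rw [ih, ih (0 + pvV x)]; ring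

lemma pvCS_ne_nil (c : Int) (xs : List String) : pvCS c xs ≠ [] := by
  induction xs generalizing c with
  | nil => simp [pvCS]
  | cons x xs ih => by_cases hx : x = "" <;> simp [pvCS, hx, ih]

lemma pvS_cons (x : String) (xs : List String) : pvS (x :: xs) = pvV x + pvS xs := by
  simp only [pvS, List.foldl_cons]
  rw [pvS_shift xs (0 + pvV x)]
  simp only [pvS]
  ring

lemma pvCS_no_sep : ∀ (xs : List String) (c : Int), "" ∉ xs → pvCS c xs = [c + pvS xs] := by
  intro xs
  induction xs with
  | nil => intro c _; simp [pvCS, pvS]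
  | cons x xs ih =>
    intro c h
    have hx : x ≠ "" := fun he => h (he ▸ List.mem_cons_self)
    simp only [pvCS, if_neg hx]
    rw [ih _ (fun hm => h (List.mem_cons_of_mem _ hm)), pvS_cons, add_assoc]

lemma pvCS_split (zs : List String) : ∀ (ys : List String) (c : Int), "" ∉ ys →
    pvCS c (ys ++ "" :: zs) = (c + pvS ys) :: pvCS 0 zs := by
  intro ys
  induction ys with
  | nil => intro c _; simp [pvCS, pvS]
  | cons y ys ih =>
    intro c h
    have hy : y ≠ "" := fun he => h (he ▸ List.mem_cons_self)
    simp only [List.cons_append, pvCS, if_neg hy]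
    rw [ih _ (fun hm => h (List.mem_cons_of_mem _ hm)), pvS_cons, add_assoc]

lemma pvNotContains (d : PySem.Dict Int Int) (id : Int) (h : ∀ k ∈ d.keys, k < id) :
    d.contains id = false := by
  cases hcon : d.contains id
  · rfl
  · exact absurd (h _ ((PySem.Dict.contains_iff_mem_keys _ _).1 hcon)) (lt_irrefl _)

-- A-side: the final dict values are d.values ++ pvCS cal xs
lemma pvA_vals (xs : List String) : ∀ (d : PySem.Dict Int Int) (id cal : Int),
    (∀ k ∈ d.keys, k < id) →
    ((xs.foldl part1Step (d, id, cal)).1.insert (xs.foldl part1Step (d, id, cal)).2.1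
        (xs.foldl part1Step (d, id, cal)).2.2).values = d.values ++ pvCS cal xs := by
  induction xs with
  | nil =>
    intro d id cal h
    have hc : d.contains id = false := pvNotContains d id h
    simp only [List.foldl_nil, pvCS, PySem.Dict.values]
    rw [PySem.Dict.items_insert_of_not_contains (d := d) (k := id) (v := cal) hc]
    simp
  | cons x xs ih =>
    intro d id cal h
    by_cases hx : x = ""
    · subst hx
      have hc : d.contains id = false := pvNotContains d id h
      have h' : ∀ k ∈ (d.insert id cal).keys, k < id + 1 := by
        intro k hk
        rw [PySem.Dict.mem_keys_insert] at hk
        rcases hk with rfl | hk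
        · omega
        · have := h _ hk; omega
      simp only [List.foldl_cons, part1Step, ne_eq, not_true_eq_false, if_false]
      rw [ih _ _ _ h']
      simp only [pvCS, PySem.Dict.values]
      rw [PySem.Dict.items_insert_of_not_contains (d := d) (k := id) (v := cal) hc]
      simp
    · simp only [List.foldl_cons, part1Step, ne_eq, hx, not_false_eq_true, if_true]
      rw [ih _ _ _ h]
      simp [pvCS, hx, pvV]

lemma pvA_eq (xs : List String) :
    part1 xs = (PySem.List.max? (pvCS 0 xs) (fun x => x)).getD 0 := by
  have := pvA_vals xs PySem.Dict.empty 1 0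
    (by intro k hk; simp [PySem.Dict.keys, PySem.Dict.empty] at hk)
  simp only [part1]
  rw [this]
  have : (PySem.Dict.empty : PySem.Dict Int Int).values = [] := by
    simp [PySem.Dict.values, PySem.Dict.empty]
  rw [this, List.nil_append]

-- max over a cons with nonempty tail
lemma pvMax_cons (a : Int) (l : List Int) (h : l ≠ []) :
    (PySem.List.max? (a :: l) (fun x => x)).getD 0
      = max a ((PySem.List.max? l (fun x => x)).getD 0) := by
  obtain ⟨b, t, rfl⟩ := List.exists_cons_of_ne_nil h
  rw [PySem.List.max?_id_cons, PySem.List.max?_id_cons]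
  simp only [Option.getD_some, List.foldl_cons]
  exact List.foldl_assoc

-- B-side: part1_alt equals max over the reference group sums
lemma pvB_eq (n : Nat) : ∀ xs : List String, xs.length ≤ n →
    part1_alt xs = (PySem.List.max? (pvCS 0 xs) (fun x => x)).getD 0 := by
  induction n with
  | zero =>
    intro xs hlen
    have : xs = [] := List.eq_nil_of_length_eq_zero (Nat.le_zero.1 hlen)
    subst this
    rw [part1_alt]
    simp [pvCS, PySem.List.max?]
  | succ n ih =>
    intro xs hlen
    by_cases h : "" ∈ xs
    · obtain ⟨i, hi⟩ := (PySem.List.index?_isSome_iff xs "").2 h |> Option.isSome_iff_exists.1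
      obtain ⟨pre, suf, hx, hpl, hnp⟩ := (PySem.List.index?_eq_some_iff xs "" i).1 hi
      rw [part1_alt, dif_pos h]
      simp only [hi, Option.getD_some]
      have hslice1 : PySem.List.slice xs none (some (i : Int)) = pre := by
        rw [PySem.List.slice_to_natCast, hx, ← hpl, List.take_left]
      have hslice2 : PySem.List.slice xs (some ((i : Int) + 1)) none = suf := by
        have h1 : ((i : Int) + 1) = ((i + 1 : Nat) : Int) := by push_cast; ring
        rw [h1, PySem.List.slice_from_natCast, hx]
        have : pre ++ "" :: suf = (pre ++ [""]) ++ suf := by simp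
        rw [this, List.drop_left' (by simp [hpl])]
      rw [hslice1, hslice2]
      have hlen2 : suf.length ≤ n := by
        subst hx; simp at hlen; omega
      rw [ih suf hlen2]
      rw [hx, pvCS_split suf pre 0 hnp]
      rw [pvMax_cons _ _ (pvCS_ne_nil 0 suf)]
      simp [pvS, pvV]
    · rw [part1_alt, dif_neg h]
      rw [pvCS_no_sep xs 0 h]
      simp only [PySem.List.max?_id_cons, List.foldl_nil, Option.getD_some]
      simp [pvS, pvV]

-- ===== VERDICT (by name: the statement is the Claim_ definition above) =====
theorem part1_spec : Claim_equal_part1 := by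
  intro xs _ _
  unfold Spec_part1
  rw [pvA_eq, pvB_eq xs.length xs le_rfl]
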